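-- pv_equiv track=rewrite | github.com/tadigotla/focus-monitor | focusmonitor/sessions.py | extract_cycle_signals
-- ===== SOURCE A (Python) =====
-- def _browser_host(url):
--     """Return the lowercased host portion of a URL string, or None."""
--     if not url or not isinstance(url, str):
--         return None
--     s = url.strip()
--     for prefix in ("https://", "http://"):
--         if s.lower().startswith(prefix):
--             s = s[len(prefix):]
--             break
--     host = s.split("/", 1)[0].split("?", 1)[0]
--     return host.lower() or None
--
-- def extract_cycle_signals(artifacts):
--     """Given a list of Pass 1 structured artifacts for one cycle, return
--     the distinct workspaces, terminal cwds, and browser hosts seen across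
--     them. The aggregator uses these as the glue signature.
--     """
--     workspaces = []
--     cwds = []
--     hosts = []
--     seen_ws = set()
--     seen_cwd = set()
--     seen_host = set()
--     for art in (artifacts or []):
--         if not isinstance(art, dict):
--             continue
--         ws = art.get("workspace")
--         if isinstance(ws, str) and ws.strip() and ws.strip().lower() not in seen_ws:
--             workspaces.append(ws.strip())
--             seen_ws.add(ws.strip().lower())
--         cwd = art.get("terminal_cwd")
--         if isinstance(cwd, str) and cwd.strip() and cwd.strip().lower() not in seen_cwd:
--             cwds.append(cwd.strip())
--             seen_cwd.add(cwd.strip().lower())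
--         host = _browser_host(art.get("browser_url"))
--         if host and host not in seen_host:
--             hosts.append(host)
--             seen_host.add(host)
--     return {
--         "workspaces": workspaces,
--         "terminal_cwds": cwds,
--         "browser_hosts": hosts,
--     }
-- ===== SOURCE B (Python) =====
-- def _host_of(url):
--     """Host part of a URL (lowercased) or None, computed by a single scan."""
--     if not isinstance(url, str):
--         return None
--     s = url.strip()
--     low = s.lower()
--     if low.startswith("https://"):
--         s = s[8:]
--     elif low.startswith("http://"):
--         s = s[7:]
--     chars = []
--     for ch in s:
--         if ch in "/?":
--             break
--         chars.append(ch)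
--     return "".join(chars).lower() or None
--
--
-- def ordered_unique(values, key):
--     """Order-preserving dedup with NO seen-set: repeatedly take the first
--     remaining value and filter every later value with the same key out of
--     the remaining work list."""
--     out = []
--     rest = values
--     while rest:
--         head = rest[0]
--         out.append(head)
--         k = key(head)
--         rest = [v for v in rest[1:] if key(v) != k]
--     return out
--
--
-- def extract_cycle_signals(artifacts):
--     arts = [a for a in (artifacts or []) if isinstance(a, dict)]
--     ws_raw = [w.strip() for w in (a.get("workspace") for a in arts)
--               if isinstance(w, str) and w.strip()]
--     cwd_raw = [c.strip() for c in (a.get("terminal_cwd") for a in arts)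
--                if isinstance(c, str) and c.strip()]
--     host_raw = [h for h in (_host_of(a.get("browser_url")) for a in arts) if h]
--     return {
--         "workspaces": ordered_unique(ws_raw, str.lower),
--         "terminal_cwds": ordered_unique(cwd_raw, str.lower),
--         "browser_hosts": ordered_unique(host_raw, lambda h: h),
--     }
-- ===== Notes on version B (the rewrite author's own statement) =====
-- stated objective: alternative
-- what changed: Replaces A's single loop threading three output lists plus three seen-sets with three independent field-extraction passes deduplicated by a set-free sieve: repeatedly take the first remaining value and filter all later same-key values out of the work list (and the host truncation becomes one scan-until-separator instead of two split calls).
import Mathlib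
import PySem

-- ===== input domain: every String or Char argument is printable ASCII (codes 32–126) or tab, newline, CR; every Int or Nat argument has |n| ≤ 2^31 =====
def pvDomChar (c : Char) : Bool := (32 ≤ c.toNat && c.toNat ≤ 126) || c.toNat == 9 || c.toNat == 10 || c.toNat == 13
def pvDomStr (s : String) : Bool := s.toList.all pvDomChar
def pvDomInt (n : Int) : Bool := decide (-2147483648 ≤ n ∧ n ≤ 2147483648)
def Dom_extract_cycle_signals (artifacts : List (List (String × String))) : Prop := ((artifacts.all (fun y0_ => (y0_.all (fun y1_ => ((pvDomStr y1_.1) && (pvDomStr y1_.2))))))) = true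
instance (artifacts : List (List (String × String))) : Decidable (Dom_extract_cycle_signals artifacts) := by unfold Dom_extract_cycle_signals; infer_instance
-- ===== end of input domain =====

-- B replaces A's single loop threading three output lists plus three seen-sets by three
-- independent field-extraction passes deduplicated by a SET-FREE sieve (take the first
-- remaining value, filter later same-key values out of the work list); objective: alternative.

-- ===== PORT A =====

-- s.split(sep, 1)[0]: split with a nonempty separator always yields a nonempty list,
-- so the wildcard arm is unreachable.
def firstPiece (o : Option (List String)) : String :=
  match o with
  | some (p :: _) => p
  | _ => ""

-- _browser_host(url); isinstance(url, str) is always true under the type convention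
def pyBrowserHost (url : Option String) : Option String :=
  match url with
  | none => none
  | some u =>
    if u = "" then none      -- `if not url: return None`
    else
      let s := PySem.Str.strip u
      -- `for prefix in ("https://", "http://"): … break` unrolled over the two literals
      let s :=
        if PySem.Str.startswith (PySem.Str.lower s) "https://" then PySem.Str.slice s (some 8) none
        else if PySem.Str.startswith (PySem.Str.lower s) "http://" then PySem.Str.slice s (some 7) none
        else s
      let host := firstPiece (PySem.Str.splitMax? s "/" 1)
      let host := firstPiece (PySem.Str.splitMax? host "?" 1)
      -- `return host.lower() or None`
      if PySem.Str.lower host = "" then none else some (PySem.Str.lower host)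

def extract_cycle_signals (artifacts : List (List (String × String))) : List (String × List String) :=
  -- state: ((workspaces, seen_ws), (cwds, seen_cwd), (hosts, seen_host));
  -- `isinstance(art, dict)` is always true under the type convention
  let final := artifacts.foldl
    (fun (st : (List String × PySem.Set String) × (List String × PySem.Set String) × (List String × PySem.Set String)) art =>
      let d := PySem.Dict.mk art
      let st :=
        match PySem.Dict.get? d "workspace" with
        | some ws =>
          if (PySem.Str.strip ws != "") && !(PySem.Set.contains st.1.2 (PySem.Str.lower (PySem.Str.strip ws))) then
            ((st.1.1 ++ [PySem.Str.strip ws], PySem.Set.add st.1.2 (PySem.Str.lower (PySem.Str.strip ws))), st.2)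
          else st
        | none => st
      let st :=
        match PySem.Dict.get? d "terminal_cwd" with
        | some cwd =>
          if (PySem.Str.strip cwd != "") && !(PySem.Set.contains st.2.1.2 (PySem.Str.lower (PySem.Str.strip cwd))) then
            (st.1, ((st.2.1.1 ++ [PySem.Str.strip cwd], PySem.Set.add st.2.1.2 (PySem.Str.lower (PySem.Str.strip cwd))), st.2.2))
          else st
        | none => st
      let st :=
        match pyBrowserHost (PySem.Dict.get? d "browser_url") with
        | some h =>
          if (h != "") && !(PySem.Set.contains st.2.2.2 h) then
            (st.1, (st.2.1, (st.2.2.1 ++ [h], PySem.Set.add st.2.2.2 h)))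
          else st
        | none => st
      st)
    (([], PySem.Set.empty), ([], PySem.Set.empty), ([], PySem.Set.empty))
  [("workspaces", final.1.1), ("terminal_cwds", final.2.1.1), ("browser_hosts", final.2.2.1)]

-- ===== PORT B =====

-- _host_of(url); isinstance(url, str) is always true under the type convention
def hostOf (url : Option String) : Option String :=
  match url with
  | none => none
  | some u =>
    let s := PySem.Str.strip u
    let low := PySem.Str.lower s
    let s :=
      if PySem.Str.startswith low "https://" then PySem.Str.slice s (some 8) none
      else if PySem.Str.startswith low "http://" then PySem.Str.slice s (some 7) none
      else s
    -- the `for ch in s: if ch in "/?": break; chars.append(ch)` loop is takeWhile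
    let h := PySem.Str.lower (String.ofList (s.toList.takeWhile (fun ch => !(ch == '/' || ch == '?'))))
    if h = "" then none else some h

-- the `while rest:` loop of ordered_unique: take the head, filter later same-key values out
def ouLoop (key : String → String) (out rest : List String) : List String :=
  match rest with
  | [] => out
  | h :: t => ouLoop key (out ++ [h]) (t.filter (fun v => !(key v == key h)))
termination_by rest.length
decreasing_by simp only [List.length_unattach]; exact Nat.lt_succ_of_le (le_trans (List.length_filter_le _ _) (by simp))

-- ordered_unique(values, key): the set-free sieve
def ordered_unique (key : String → String) (values : List String) : List String :=
  ouLoop key [] values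

def extract_cycle_signals_alt (artifacts : List (List (String × String))) : List (String × List String) :=
  -- the `isinstance(a, dict)` filter keeps everything under the type convention
  let wsRaw := artifacts.filterMap (fun a =>
    match PySem.Dict.get? (PySem.Dict.mk a) "workspace" with
    | some w => if PySem.Str.strip w != "" then some (PySem.Str.strip w) else none
    | none => none)
  let cwdRaw := artifacts.filterMap (fun a =>
    match PySem.Dict.get? (PySem.Dict.mk a) "terminal_cwd" with
    | some w => if PySem.Str.strip w != "" then some (PySem.Str.strip w) else none
    | none => none)
  let hostRaw := artifacts.filterMap (fun a =>
    match hostOf (PySem.Dict.get? (PySem.Dict.mk a) "browser_url") with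
    | some h => if h != "" then some h else none
    | none => none)
  [("workspaces", ordered_unique PySem.Str.lower wsRaw),
   ("terminal_cwds", ordered_unique PySem.Str.lower cwdRaw),
   ("browser_hosts", ordered_unique (fun h => h) hostRaw)]

-- ===== PRECONDITION & SPEC =====
def Spec_extract_cycle_signals (artifacts : List (List (String × String))) (out : List (String × List String)) : Prop := out = extract_cycle_signals_alt artifacts
instance (artifacts : List (List (String × String))) (out : List (String × List String)) : Decidable (Spec_extract_cycle_signals artifacts out) := by unfold Spec_extract_cycle_signals; infer_instance

-- ===== CLAIM (what is proved, stated in full; the proofs are below) =====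
def Claim_equal_extract_cycle_signals : Prop := ∀ (artifacts : List (List (String × String))), Dom_extract_cycle_signals artifacts → Spec_extract_cycle_signals artifacts (extract_cycle_signals artifacts)

-- ===== LEMMAS AND PROOFS =====

-- ---- the two host helpers agree ----

lemma go_zero (sep : List Char) (fuel : Nat) (l cur : List Char) (acc : List (List Char)) :
    PySem.Chars.splitOnMax.go sep fuel 0 l cur acc = acc.reverse ++ [cur.reverse ++ l] := by
  cases fuel <;> cases l <;> simp [PySem.Chars.splitOnMax.go]

lemma go_one (c : Char) : ∀ (fuel : Nat) (l cur : List Char) (acc : List (List Char)),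
    l.length < fuel →
    PySem.Chars.splitOnMax.go [c] fuel 1 l cur acc =
      acc.reverse ++ (if c ∈ l
        then [cur.reverse ++ l.takeWhile (fun x => x != c), (l.dropWhile (fun x => x != c)).drop 1]
        else [cur.reverse ++ l]) := by
  intro fuel
  induction fuel with
  | zero => intro l cur acc h; omega
  | succ n ih =>
    intro l cur acc h
    cases l with
    | nil => simp [PySem.Chars.splitOnMax.go]
    | cons x xs =>
      by_cases hx : x = c
      · subst hx
        simp [PySem.Chars.splitOnMax.go, List.isPrefixOf, go_zero]
      · have hcx : (c == x) = false := by simp [Ne.symm hx]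
        have hxs : xs.length < n := by simp at h; omega
        have hxc : (x != c) = true := by simp [hx]
        simp only [PySem.Chars.splitOnMax.go, List.isPrefixOf, hcx,
          Bool.and_true, one_ne_zero, reduceIte, Bool.false_eq_true]
        rw [ih xs (x :: cur) acc hxs]
        by_cases hm : c ∈ xs <;>
          simp [hm, Ne.symm hx, hxc]

lemma takeWhile_of_not_mem (c : Char) (l : List Char) (h : c ∉ l) :
    l.takeWhile (fun x => x != c) = l := by
  induction l with
  | nil => rfl
  | cons x xs ih =>
    simp at h
    simp [Ne.symm h.1, ih h.2]

lemma splitFirst (s : String) (c : Char) (sep : String) (hsep : sep.toList = [c]) :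
    firstPiece (PySem.Str.splitMax? s sep 1) =
      String.ofList (s.toList.takeWhile (fun x => x != c)) := by
  have h1 : (1 : Int).toNat = 1 := rfl
  simp only [PySem.Str.splitMax?, PySem.Chars.splitMax?, hsep, List.isEmpty_cons,
    PySem.Chars.splitOnMax, h1]
  norm_num
  rw [go_one c (s.length + 1) s.toList [] []
    (by simp)]
  by_cases hm : c ∈ s.toList
  · simp [hm, firstPiece]
  · simp [hm, firstPiece, takeWhile_of_not_mem c _ hm]

lemma toList_ofList (l : List Char) : (String.ofList l).toList = l := by
  simp

lemma hostcore (s : String) :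
    firstPiece (PySem.Str.splitMax? (firstPiece (PySem.Str.splitMax? s "/" 1)) "?" 1) =
      String.ofList (s.toList.takeWhile (fun ch => !(ch == '/' || ch == '?'))) := by
  rw [splitFirst s '/' "/" (by decide)]
  rw [splitFirst _ '?' "?" (by decide)]
  rw [toList_ofList, List.takeWhile_takeWhile]
  have hpred : (fun a => decide ((a != '?') = true ∧ (a != '/') = true)) =
      (fun ch : Char => !(ch == '/' || ch == '?')) := by
    funext ch
    by_cases h1 : ch = '/' <;> by_cases h2 : ch = '?' <;> simp [h1, h2]
  rw [hpred]

lemma host_eq (url : Option String) : pyBrowserHost url = hostOf url := by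
  cases url with
  | none => rfl
  | some u =>
    by_cases hu : u = ""
    · subst hu; decide
    · simp only [pyBrowserHost, hostOf, if_neg hu]
      rw [hostcore]

-- ---- factoring A's loop into three independent seen-set folds ----

-- a keyed seen-set dedup step (a proof device: A's per-field update is one of these)
def uStep (key : String → String) (st : PySem.Set String × List String) (v : String) :
    PySem.Set String × List String :=
  if PySem.Set.contains st.1 (key v) then st
  else (PySem.Set.add st.1 (key v), st.2 ++ [v])

-- A's loop body, named (definitionally the lambda inside extract_cycle_signals)
def aStep
    (st : (List String × PySem.Set String) × (List String × PySem.Set String) × (List String × PySem.Set String))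
    (art : List (String × String)) :
    (List String × PySem.Set String) × (List String × PySem.Set String) × (List String × PySem.Set String) :=
  let d := PySem.Dict.mk art
  let st :=
    match PySem.Dict.get? d "workspace" with
    | some ws =>
      if (PySem.Str.strip ws != "") && !(PySem.Set.contains st.1.2 (PySem.Str.lower (PySem.Str.strip ws))) then
        ((st.1.1 ++ [PySem.Str.strip ws], PySem.Set.add st.1.2 (PySem.Str.lower (PySem.Str.strip ws))), st.2)
      else st
    | none => st
  let st :=
    match PySem.Dict.get? d "terminal_cwd" with
    | some cwd =>
      if (PySem.Str.strip cwd != "") && !(PySem.Set.contains st.2.1.2 (PySem.Str.lower (PySem.Str.strip cwd))) then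
        (st.1, ((st.2.1.1 ++ [PySem.Str.strip cwd], PySem.Set.add st.2.1.2 (PySem.Str.lower (PySem.Str.strip cwd))), st.2.2))
      else st
    | none => st
  let st :=
    match pyBrowserHost (PySem.Dict.get? d "browser_url") with
    | some h =>
      if (h != "") && !(PySem.Set.contains st.2.2.2 h) then
        (st.1, (st.2.1, (st.2.2.1 ++ [h], PySem.Set.add st.2.2.2 h)))
      else st
    | none => st
  st

def fieldUpd (k : String) (p : List String × PySem.Set String) (a : List (String × String)) :
    List String × PySem.Set String :=
  match PySem.Dict.get? (PySem.Dict.mk a) k with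
  | some ws =>
    if (PySem.Str.strip ws != "") && !(PySem.Set.contains p.2 (PySem.Str.lower (PySem.Str.strip ws))) then
      (p.1 ++ [PySem.Str.strip ws], PySem.Set.add p.2 (PySem.Str.lower (PySem.Str.strip ws)))
    else p
  | none => p

def hostUpd (p : List String × PySem.Set String) (a : List (String × String)) :
    List String × PySem.Set String :=
  match pyBrowserHost (PySem.Dict.get? (PySem.Dict.mk a) "browser_url") with
  | some h =>
    if (h != "") && !(PySem.Set.contains p.2 h) then
      (p.1 ++ [h], PySem.Set.add p.2 h)
    else p
  | none => p

def fieldOf (k : String) (a : List (String × String)) : Option String :=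
  match PySem.Dict.get? (PySem.Dict.mk a) k with
  | some w => if PySem.Str.strip w != "" then some (PySem.Str.strip w) else none
  | none => none

def hostOfArt (a : List (String × String)) : Option String :=
  match hostOf (PySem.Dict.get? (PySem.Dict.mk a) "browser_url") with
  | some h => if h != "" then some h else none
  | none => none

lemma ite_fst {α β : Type} (c : Prop) [Decidable c] (a b : α × β) :
    (if c then a else b).1 = if c then a.1 else b.1 := by split_ifs <;> rfl

lemma ite_snd {α β : Type} (c : Prop) [Decidable c] (a b : α × β) :
    (if c then a else b).2 = if c then a.2 else b.2 := by split_ifs <;> rfl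

set_option maxHeartbeats 1000000 in
lemma step_proj (p1 p2 p3 : List String × PySem.Set String) (a : List (String × String)) :
    aStep (p1, p2, p3) a = (fieldUpd "workspace" p1 a, fieldUpd "terminal_cwd" p2 a, hostUpd p3 a) := by
  rcases p1 with ⟨o1, s1⟩
  rcases p2 with ⟨o2, s2⟩
  rcases p3 with ⟨o3, s3⟩
  cases h1 : PySem.Dict.get? (PySem.Dict.mk a) "workspace" <;>
  cases h2 : PySem.Dict.get? (PySem.Dict.mk a) "terminal_cwd" <;>
  cases h3 : pyBrowserHost (PySem.Dict.get? (PySem.Dict.mk a) "browser_url") <;>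
    simp only [aStep, fieldUpd, hostUpd, h1, h2, h3, ite_fst, ite_snd, ite_self] <;>
    split_ifs <;> rfl

lemma field_unit (k : String) (p : List String × PySem.Set String) (a : List (String × String)) :
    fieldUpd k p a = Prod.swap (((fieldOf k a).toList).foldl (uStep PySem.Str.lower) (Prod.swap p)) := by
  rcases p with ⟨o, s⟩
  simp only [fieldUpd, fieldOf]
  cases hw : PySem.Dict.get? (PySem.Dict.mk a) k with
  | none => simp [Prod.swap]
  | some w =>
    by_cases hs : PySem.Str.strip w = ""
    · simp [hs, Prod.swap]
    · by_cases hcon : PySem.Str.lower (PySem.Str.strip w) ∈ s <;>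
        simp [uStep, hs, hcon, Prod.swap]

lemma host_unit (p : List String × PySem.Set String) (a : List (String × String)) :
    hostUpd p a = Prod.swap (((hostOfArt a).toList).foldl (uStep (fun h => h)) (Prod.swap p)) := by
  rcases p with ⟨o, s⟩
  simp only [hostUpd, hostOfArt, host_eq]
  cases hh : hostOf (PySem.Dict.get? (PySem.Dict.mk a) "browser_url") with
  | none => simp [Prod.swap]
  | some h =>
    by_cases hs : h = ""
    · simp [hs, Prod.swap]
    · by_cases hcon : h ∈ s <;>
        simp [uStep, hs, hcon, Prod.swap]

lemma filterMap_cons_toList {α β : Type} (f : α → Option β) (a : α) (l : List α) :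
    List.filterMap f (a :: l) = (f a).toList ++ List.filterMap f l := by
  cases h : f a <;> simp [h]

lemma loopA (arts : List (List (String × String))) :
    ∀ (p1 p2 p3 : List String × PySem.Set String),
    arts.foldl aStep (p1, p2, p3) =
      (Prod.swap ((arts.filterMap (fieldOf "workspace")).foldl (uStep PySem.Str.lower) (Prod.swap p1)),
       Prod.swap ((arts.filterMap (fieldOf "terminal_cwd")).foldl (uStep PySem.Str.lower) (Prod.swap p2)),
       Prod.swap ((arts.filterMap hostOfArt).foldl (uStep (fun h => h)) (Prod.swap p3))) := by
  induction arts with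
  | nil => intro p1 p2 p3; simp
  | cons a t ih =>
    intro p1 p2 p3
    rw [List.foldl_cons, step_proj, ih]
    rw [filterMap_cons_toList, filterMap_cons_toList, filterMap_cons_toList,
      List.foldl_append, List.foldl_append, List.foldl_append]
    rw [field_unit, field_unit, host_unit]
    simp [Prod.swap_swap]

-- ---- A's seen-set fold equals B's sieve ----

lemma ouLoop_nil (key : String → String) (out : List String) : ouLoop key out [] = out := by
  rw [ouLoop.eq_def]

lemma ouLoop_cons (key : String → String) (out : List String) (h : String) (t : List String) :
    ouLoop key out (h :: t) = ouLoop key (out ++ [h]) (t.filter (fun v => !(key v == key h))) := by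
  rw [ouLoop.eq_def]

lemma sieve_eq_fold (key : String → String) :
    ∀ (rest : List String) (S : PySem.Set String) (out : List String),
    (rest.foldl (uStep key) (S, out)).2 =
      ouLoop key out (rest.filter (fun v => !(PySem.Set.contains S (key v)))) := by
  intro rest
  induction rest with
  | nil => intro S out; simp [ouLoop_nil]
  | cons h t ih =>
    intro S out
    by_cases hc : key h ∈ S
    · have : PySem.Set.contains S (key h) = true := by
        simp [hc]
      simp only [List.foldl_cons, uStep, this, reduceIte, List.filter_cons,
        Bool.not_true, Bool.false_eq_true]
      exact ih S out
    · have hcf : PySem.Set.contains S (key h) = false := by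
        simp [hc]
      simp only [List.foldl_cons, uStep, hcf, Bool.false_eq_true, reduceIte,
        List.filter_cons, Bool.not_false]
      rw [ih (PySem.Set.add S (key h)) (out ++ [h])]
      show _ = ouLoop key out (h :: _)
      rw [ouLoop_cons]
      congr 1
      rw [List.filter_filter]
      apply List.filter_congr
      intro v _
      by_cases hv : key v = key h
      · simp [hv, PySem.Set.mem_add]
      · have : (key v ∈ PySem.Set.add S (key h)) ↔ (key v ∈ S) := by
          rw [PySem.Set.mem_add]; simp [hv]
        by_cases hvS : key v ∈ S <;>
          simp [this, hvS, hv]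

lemma dedup_eq (key : String → String) (vs : List String) :
    ((vs.foldl (uStep key) (PySem.Set.empty, [])).2) = ordered_unique key vs := by
  rw [sieve_eq_fold, ordered_unique]
  congr 1
  apply List.filter_eq_self.mpr
  intro v _
  simp [PySem.Set.empty, PySem.Set.contains]

lemma A_unfold (arts : List (List (String × String))) :
    extract_cycle_signals arts =
      (let final := arts.foldl aStep (([], PySem.Set.empty), ([], PySem.Set.empty), ([], PySem.Set.empty))
       [("workspaces", final.1.1), ("terminal_cwds", final.2.1.1), ("browser_hosts", final.2.2.1)]) := rfl

lemma B_unfold (arts : List (List (String × String))) :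
    extract_cycle_signals_alt arts =
      [("workspaces", ordered_unique PySem.Str.lower (arts.filterMap (fieldOf "workspace"))),
       ("terminal_cwds", ordered_unique PySem.Str.lower (arts.filterMap (fieldOf "terminal_cwd"))),
       ("browser_hosts", ordered_unique (fun h => h) (arts.filterMap hostOfArt))] := rfl

-- ===== VERDICT (by name: the statement is the Claim_ definition above) =====
theorem extract_cycle_signals_spec : Claim_equal_extract_cycle_signals := by
  intro arts _
  unfold Spec_extract_cycle_signals
  rw [A_unfold, B_unfold]
  simp only [loopA]
  simp only [Prod.swap]
  rw [dedup_eq, dedup_eq, dedup_eq]
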